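-- pv_equiv track=rewrite | github.com/microsoft/agent-lightning | analyze_mismatch.py | find_min_diff_lengths
-- ===== SOURCE A (Python) =====
-- def find_min_diff_lengths(list_a, list_b):
--     """
--     计算两个列表中不匹配的连续子序列的最少长度。
--     这通过找出最长公共子序列 (LCS) 实现，然后返回两个列表中非 LCS 部分的长度。
--
--     Args:
--         list_a (list): 第一个列表。
--         list_b (list): 第二个列表。
--
--     Returns:
--         tuple: 一个元组 (diff_a_len, diff_b_len)，
--                分别表示 list_a 和 list_b 中与 LCS 不匹配部分的长度。
--     """
--     len_a = len(list_a)
--     len_b = len(list_b)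
--
--     # 1. 初始化动态规划表 (DP Table)
--     # dp[i][j] 存储 list_a[:i] 和 list_b[:j] 的 LCS 长度
--     # 尺寸为 (len_a + 1) x (len_b + 1)
--     dp = [[0] * (len_b + 1) for _ in range(len_a + 1)]
--
--     # 2. 填充 DP 表
--     for i in range(1, len_a + 1):
--         for j in range(1, len_b + 1):
--             if list_a[i - 1] == list_b[j - 1]:
--                 # 如果当前元素匹配，LCS 长度加 1
--                 dp[i][j] = dp[i - 1][j - 1] + 1
--             else:
--                 # 如果不匹配，取 (排除 list_a[i-1]) 和 (排除 list_b[j-1]) 中的较大 LCS 长度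
--                 dp[i][j] = max(dp[i - 1][j], dp[i][j - 1])
--
--     # 3. 获取最长公共子序列 (LCS) 的长度
--     lcs_length = dp[len_a][len_b]
--
--     # 4. 计算差异部分的长度
--     # 差异部分长度 = 总长度 - LCS 长度
--     diff_a_len = len_a - lcs_length
--     diff_b_len = len_b - lcs_length
--
--     return (diff_a_len, diff_b_len)
-- ===== SOURCE B (Python) =====
-- def find_min_diff_lengths(list_a, list_b):
--     # Top-down, on-demand evaluation of the LCS recurrence: an explicit work
--     # stack resolves only the subproblems reachable from (len_a, len_b),
--     # caching them in a dict keyed by k = i * (len_b + 1) + j (no bottom-up table).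
--     w = len(list_b) + 1
--     memo = {}
--     stack = [(len(list_a) * w + len(list_b), len(list_a), len(list_b))]
--     while stack:
--         k, i, j = stack[-1]
--         if k in memo:
--             stack.pop()
--         elif i == 0 or j == 0:
--             memo[k] = 0
--             stack.pop()
--         elif list_a[i - 1] == list_b[j - 1]:
--             v = memo.get(k - w - 1)
--             if v is None:
--                 stack.append((k - w - 1, i - 1, j - 1))
--             else:
--                 memo[k] = v + 1
--                 stack.pop()
--         else:
--             vl = memo.get(k - w)
--             vu = memo.get(k - 1)
--             if vl is None:
--                 stack.append((k - w, i - 1, j))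
--             elif vu is None:
--                 stack.append((k - 1, i, j - 1))
--             else:
--                 memo[k] = vl if vl > vu else vu
--                 stack.pop()
--     lcs_length = memo[len(list_a) * w + len(list_b)]
--     return (len(list_a) - lcs_length, len(list_b) - lcs_length)
-- ===== Notes on version B (the rewrite author's own statement) =====
-- stated objective: alternative
-- what changed: Replaces A's bottom-up (len_a+1)x(len_b+1) DP table filled by nested index loops with a top-down memoized evaluation: an explicit work stack resolves only the LCS subproblems reachable from (len_a, len_b), caching them in a dict keyed by i*(len_b+1)+j.
import Mathlib
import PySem

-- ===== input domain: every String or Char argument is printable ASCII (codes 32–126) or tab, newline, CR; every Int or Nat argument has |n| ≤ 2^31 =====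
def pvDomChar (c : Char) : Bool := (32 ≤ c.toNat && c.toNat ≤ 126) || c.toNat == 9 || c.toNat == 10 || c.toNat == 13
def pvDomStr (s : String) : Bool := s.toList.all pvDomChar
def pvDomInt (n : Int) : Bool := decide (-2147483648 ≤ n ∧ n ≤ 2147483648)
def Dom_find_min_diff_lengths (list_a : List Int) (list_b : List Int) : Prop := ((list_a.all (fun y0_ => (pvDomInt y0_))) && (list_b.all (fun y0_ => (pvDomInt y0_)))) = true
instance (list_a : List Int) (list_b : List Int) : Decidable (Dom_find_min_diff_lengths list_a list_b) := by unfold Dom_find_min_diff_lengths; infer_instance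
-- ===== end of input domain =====

-- B replaces A's bottom-up full DP table by a top-down memoized evaluation: an explicit
-- work stack resolves only the LCS subproblems reachable from (len_a, len_b), cached in a dict.

-- ===== PORT A =====
-- Literal port of A: full 2D DP table, nested index loops writing dp[i][j];
-- 'for i in range(1, len_a+1)' is folded over ii = i-1 ∈ List.range len_a (indices are in range).
def find_min_diff_lengths (list_a : List Int) (list_b : List Int) : Int × Int :=
  let len_a := list_a.length
  let len_b := list_b.length
  let dp0 : List (List Int) := List.replicate (len_a + 1) (List.replicate (len_b + 1) (0 : Int))
  let dp := (List.range len_a).foldl (fun dp ii =>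
      (List.range len_b).foldl (fun dp jj =>
          let v : Int :=
            if list_a.getD ii 0 = list_b.getD jj 0 then
              (dp.getD ii []).getD jj 0 + 1
            else
              max ((dp.getD ii []).getD (jj + 1) 0) ((dp.getD (ii + 1) []).getD jj 0)
          dp.set (ii + 1) ((dp.getD (ii + 1) []).set (jj + 1) v))
        dp) dp0
  let lcs := (dp.getD len_a []).getD len_b 0
  ((len_a : Int) - lcs, (len_b : Int) - lcs)

-- ===== PORT B =====
-- Port of Source B's 'while stack:' loop. Stack entries are the triples (k, i, j) with
-- k = i * w + j; memo.get(...) 'is None' checks are ported as matches on Dict.get?.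
-- The fuel argument is a totality guard only (the loop ends when the stack empties;
-- lcsRun_resolves below proves the fuel passed by find_min_diff_lengths_alt always
-- suffices). memo[k] inside the 'k in memo' branch is ported as getD (key present).
def lcsRun (list_a list_b : List Int) (w : Nat) :
    Nat → List (Nat × Nat × Nat) → PySem.Dict Nat Int → PySem.Dict Nat Int
  | 0, _, memo => memo
  | _ + 1, [], memo => memo
  | fuel + 1, (k, i, j) :: rest, memo =>
    if memo.contains k then
      lcsRun list_a list_b w fuel rest memo
    else if i = 0 ∨ j = 0 then
      lcsRun list_a list_b w fuel rest (memo.insert k 0)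
    else if list_a.getD (i - 1) 0 = list_b.getD (j - 1) 0 then
      match memo.get? (k - w - 1) with
      | none => lcsRun list_a list_b w fuel ((k - w - 1, i - 1, j - 1) :: (k, i, j) :: rest) memo
      | some v => lcsRun list_a list_b w fuel rest (memo.insert k (v + 1))
    else
      match memo.get? (k - w), memo.get? (k - 1) with
      | none, _ => lcsRun list_a list_b w fuel ((k - w, i - 1, j) :: (k, i, j) :: rest) memo
      | some _, none => lcsRun list_a list_b w fuel ((k - 1, i, j - 1) :: (k, i, j) :: rest) memo
      | some vl, some vu =>
          lcsRun list_a list_b w fuel rest (memo.insert k (if vl > vu then vl else vu))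

def find_min_diff_lengths_alt (list_a : List Int) (list_b : List Int) : Int × Int :=
  let len_a := list_a.length
  let len_b := list_b.length
  let w := len_b + 1
  let memo := lcsRun list_a list_b w (5 ^ (len_a + len_b + 1) + 1)
      [(len_a * w + len_b, len_a, len_b)] PySem.Dict.empty
  let lcs_length := memo.getD (len_a * w + len_b) 0
  ((len_a : Int) - lcs_length, (len_b : Int) - lcs_length)

-- ===== PRECONDITION & SPEC =====
def Spec_find_min_diff_lengths (list_a : List Int) (list_b : List Int) (out : Int × Int) : Prop := out = find_min_diff_lengths_alt list_a list_b
instance (list_a : List Int) (list_b : List Int) (out : Int × Int) : Decidable (Spec_find_min_diff_lengths list_a list_b out) := by unfold Spec_find_min_diff_lengths; infer_instance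

-- ===== CLAIM (what is proved, stated in full; the proofs are below) =====
def Claim_equal_find_min_diff_lengths : Prop := ∀ (list_a : List Int) (list_b : List Int), Dom_find_min_diff_lengths list_a list_b → Spec_find_min_diff_lengths list_a list_b (find_min_diff_lengths list_a list_b)

-- ===== LEMMAS AND PROOFS =====

-- the LCS recurrence as a pure function: lcsL la lb i j = LCS length of la[:i] and lb[:j]
def lcsL (la lb : List Int) : Nat → Nat → Int
  | 0, _ => 0
  | _ + 1, 0 => 0
  | i + 1, j + 1 =>
    if la.getD i 0 = lb.getD j 0 then lcsL la lb i j + 1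
    else max (lcsL la lb i (j + 1)) (lcsL la lb (i + 1) j)
  termination_by i j => (i, j)

theorem lcsL_zero (la lb : List Int) (i j : Nat) (h : i = 0 ∨ j = 0) :
    lcsL la lb i j = 0 := by
  rcases h with h | h
  · subst h; simp [lcsL]
  · subst h; cases i <;> simp [lcsL]

theorem lcsL_succ (la lb : List Int) (i j : Nat) :
    lcsL la lb (i + 1) (j + 1)
      = if la.getD i 0 = lb.getD j 0 then lcsL la lb i j + 1
        else max (lcsL la lb i (j + 1)) (lcsL la lb (i + 1) j) := by
  rw [lcsL]

-- arithmetic about the key encoding k = i * w + j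
theorem encKey (i j w : Nat) : (i + 1) * w + (j + 1) = i * w + j + w + 1 := by ring

theorem encInj (w i j i' j' : Nat) (hj : j < w) (hj' : j' < w)
    (h : i * w + j = i' * w + j') : i = i' ∧ j = j' := by
  have hw : 0 < w := by omega
  have h1 : (i * w + j) % w = j := by
    rw [Nat.add_comm, Nat.add_mul_mod_self_right, Nat.mod_eq_of_lt hj]
  have h2 : (i' * w + j') % w = j' := by
    rw [Nat.add_comm, Nat.add_mul_mod_self_right, Nat.mod_eq_of_lt hj']
  have hjj : j = j' := by rw [← h1, ← h2, h]
  subst hjj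
  have : i * w = i' * w := by omega
  exact ⟨Nat.eq_of_mul_eq_mul_right hw this, rfl⟩

-- ===== step lemmas (one branch of Source B's while loop each) =====
theorem step_hit (la lb : List Int) (w k i j : Nat) (rest : List (Nat × Nat × Nat)) (fuel : Nat)
    (memo : PySem.Dict Nat Int) (h : memo.contains k = true) :
    lcsRun la lb w (fuel + 1) ((k, i, j) :: rest) memo = lcsRun la lb w fuel rest memo := by
  simp [lcsRun, h]

theorem step_base (la lb : List Int) (w k i j : Nat) (rest : List (Nat × Nat × Nat)) (fuel : Nat)
    (memo : PySem.Dict Nat Int) (hc : memo.contains k = false) (h : i = 0 ∨ j = 0) :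
    lcsRun la lb w (fuel + 1) ((k, i, j) :: rest) memo
      = lcsRun la lb w fuel rest (memo.insert k 0) := by
  simp [lcsRun, hc, h]

theorem step_match_hit (la lb : List Int) (w i j : Nat) (rest : List (Nat × Nat × Nat)) (fuel : Nat)
    (memo : PySem.Dict Nat Int) (v : Int)
    (hc : memo.contains ((i + 1) * w + (j + 1)) = false)
    (ha : la.getD i 0 = lb.getD j 0)
    (hcd : memo.get? (i * w + j) = some v) :
    lcsRun la lb w (fuel + 1) (((i + 1) * w + (j + 1), i + 1, j + 1) :: rest) memo
      = lcsRun la lb w fuel rest (memo.insert ((i + 1) * w + (j + 1)) (v + 1)) := by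
  have ha' : la[i]?.getD 0 = lb[j]?.getD 0 := by simpa [List.getD] using ha
  have e : (i + 1) * w + (j + 1) - w - 1 = i * w + j := by
    have := encKey i j w; omega
  simp [lcsRun, hc, ha', e, hcd, List.getD]

theorem step_match_push (la lb : List Int) (w i j : Nat) (rest : List (Nat × Nat × Nat)) (fuel : Nat)
    (memo : PySem.Dict Nat Int)
    (hc : memo.contains ((i + 1) * w + (j + 1)) = false)
    (ha : la.getD i 0 = lb.getD j 0)
    (hcd : memo.get? (i * w + j) = none) :
    lcsRun la lb w (fuel + 1) (((i + 1) * w + (j + 1), i + 1, j + 1) :: rest) memo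
      = lcsRun la lb w fuel ((i * w + j, i, j) :: ((i + 1) * w + (j + 1), i + 1, j + 1) :: rest) memo := by
  have ha' : la[i]?.getD 0 = lb[j]?.getD 0 := by simpa [List.getD] using ha
  have e : (i + 1) * w + (j + 1) - w - 1 = i * w + j := by
    have := encKey i j w; omega
  simp [lcsRun, hc, ha', e, hcd, List.getD]

theorem step_left_push (la lb : List Int) (w i j : Nat) (rest : List (Nat × Nat × Nat)) (fuel : Nat)
    (memo : PySem.Dict Nat Int)
    (hc : memo.contains ((i + 1) * w + (j + 1)) = false)
    (ha : ¬ la.getD i 0 = lb.getD j 0)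
    (hl : memo.get? (i * w + (j + 1)) = none) :
    lcsRun la lb w (fuel + 1) (((i + 1) * w + (j + 1), i + 1, j + 1) :: rest) memo
      = lcsRun la lb w fuel ((i * w + (j + 1), i, j + 1) :: ((i + 1) * w + (j + 1), i + 1, j + 1) :: rest) memo := by
  have ha' : ¬ la[i]?.getD 0 = lb[j]?.getD 0 := by simpa [List.getD] using ha
  have e : (i + 1) * w + (j + 1) - w = i * w + (j + 1) := by
    have := encKey i j w; omega
  simp [lcsRun, hc, ha', e, hl, List.getD]

theorem step_right_push (la lb : List Int) (w i j : Nat) (rest : List (Nat × Nat × Nat)) (fuel : Nat)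
    (memo : PySem.Dict Nat Int) (vl : Int)
    (hc : memo.contains ((i + 1) * w + (j + 1)) = false)
    (ha : ¬ la.getD i 0 = lb.getD j 0)
    (hl : memo.get? (i * w + (j + 1)) = some vl)
    (hr : memo.get? ((i + 1) * w + j) = none) :
    lcsRun la lb w (fuel + 1) (((i + 1) * w + (j + 1), i + 1, j + 1) :: rest) memo
      = lcsRun la lb w fuel (((i + 1) * w + j, i + 1, j) :: ((i + 1) * w + (j + 1), i + 1, j + 1) :: rest) memo := by
  have ha' : ¬ la[i]?.getD 0 = lb[j]?.getD 0 := by simpa [List.getD] using ha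
  have e1 : (i + 1) * w + (j + 1) - w = i * w + (j + 1) := by
    have := encKey i j w; omega
  have e2 : (i + 1) * w + (j + 1) - 1 = (i + 1) * w + j := by omega
  simp [lcsRun, hc, ha', e1, e2, hl, hr, List.getD]

theorem step_resolve (la lb : List Int) (w i j : Nat) (rest : List (Nat × Nat × Nat)) (fuel : Nat)
    (memo : PySem.Dict Nat Int) (vl vu : Int)
    (hc : memo.contains ((i + 1) * w + (j + 1)) = false)
    (ha : ¬ la.getD i 0 = lb.getD j 0)
    (hl : memo.get? (i * w + (j + 1)) = some vl)
    (hr : memo.get? ((i + 1) * w + j) = some vu) :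
    lcsRun la lb w (fuel + 1) (((i + 1) * w + (j + 1), i + 1, j + 1) :: rest) memo
      = lcsRun la lb w fuel rest
          (memo.insert ((i + 1) * w + (j + 1)) (if vl > vu then vl else vu)) := by
  have ha' : ¬ la[i]?.getD 0 = lb[j]?.getD 0 := by simpa [List.getD] using ha
  have e1 : (i + 1) * w + (j + 1) - w = i * w + (j + 1) := by
    have := encKey i j w; omega
  have e2 : (i + 1) * w + (j + 1) - 1 = (i + 1) * w + j := by omega
  simp [lcsRun, hc, ha', e1, e2, hl, hr, List.getD]

theorem run_nil (la lb : List Int) (w f : Nat) (memo : PySem.Dict Nat Int) :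
    lcsRun la lb w f [] memo = memo := by cases f <;> rfl

-- every memo entry at an encoded key is the corresponding lcsL value
def lcsGood (la lb : List Int) (memo : PySem.Dict Nat Int) : Prop :=
  ∀ i j v, j ≤ lb.length
    → memo.get? (i * (lb.length + 1) + j) = some v → v = lcsL la lb i j

theorem lcsGood_insert (la lb : List Int) (memo : PySem.Dict Nat Int)
    (i j : Nat) (v : Int) (hj : j ≤ lb.length)
    (hg : lcsGood la lb memo) (hv : v = lcsL la lb i j) :
    lcsGood la lb (memo.insert (i * (lb.length + 1) + j) v) := by
  intro i' j' w' hj' hw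
  rw [PySem.Dict.get?_insert] at hw
  split at hw
  · rename_i hk
    obtain ⟨hi, hjj⟩ := encInj (lb.length + 1) i' j' i j (by omega) (by omega) hk
    cases hw; subst hi; subst hjj; exact hv
  · exact hg i' j' w' hj' hw

theorem get?_some_of_contains (la lb : List Int) (memo : PySem.Dict Nat Int)
    (i j : Nat) (hj : j ≤ lb.length) (hg : lcsGood la lb memo)
    (h : memo.contains (i * (lb.length + 1) + j) = true) :
    memo.get? (i * (lb.length + 1) + j) = some (lcsL la lb i j) := by
  rw [PySem.Dict.contains_eq_isSome_get?] at h
  obtain ⟨v, hv⟩ := Option.isSome_iff_exists.mp h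
  rw [hv, hg i j v hj hv]

theorem contains_of_get?_some {memo : PySem.Dict Nat Int} {k : Nat} {v : Int}
    (h : memo.get? k = some v) : memo.contains k = true := by
  rw [PySem.Dict.contains_eq_isSome_get?, h]; rfl

theorem get?_none_of_not_contains {memo : PySem.Dict Nat Int} {k : Nat}
    (h : memo.contains k = false) : memo.get? k = none := by
  cases hv : memo.get? k with
  | none => rfl
  | some v => rw [contains_of_get?_some hv] at h; cases h

theorem lcsRun_resolves (la lb : List Int) :
    ∀ (d : Nat), ∀ (i j : Nat), i + j ≤ d → j ≤ lb.length →
    ∀ memo, lcsGood la lb memo →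
    ∃ (F : Nat) (memo' : PySem.Dict Nat Int),
      F ≤ 5 ^ (d + 1) ∧ lcsGood la lb memo' ∧
      memo'.get? (i * (lb.length + 1) + j) = some (lcsL la lb i j) ∧
      (∀ k v, memo.get? k = some v → memo'.get? k = some v) ∧
      (∀ rest fuel,
        lcsRun la lb (lb.length + 1) (F + fuel)
            ((i * (lb.length + 1) + j, i, j) :: rest) memo
          = lcsRun la lb (lb.length + 1) fuel rest memo') := by
  intro d
  induction d with
  | zero =>
      intro i j hij hjm memo hg
      have hi : i = 0 := by omega
      have hj : j = 0 := by omega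
      subst hi; subst hj
      by_cases hc : memo.contains (0 * (lb.length + 1) + 0) = true
      · exact ⟨1, memo, by norm_num, hg,
          get?_some_of_contains la lb memo 0 0 (by omega) hg hc,
          fun k v h => h,
          fun rest fuel => by
            rw [Nat.add_comm 1 fuel, step_hit la lb (lb.length + 1) _ 0 0 rest fuel memo hc]⟩
      · have hc' : memo.contains (0 * (lb.length + 1) + 0) = false := by simpa using hc
        refine ⟨1, memo.insert (0 * (lb.length + 1) + 0) 0, by norm_num,
          lcsGood_insert la lb memo 0 0 0 (by omega) hg (by simp [lcsL]),
          by rw [PySem.Dict.get?_insert]; simp [lcsL], ?_,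
          fun rest fuel => by
            rw [Nat.add_comm 1 fuel, step_base la lb (lb.length + 1) _ 0 0 rest fuel memo hc' (Or.inl rfl)]⟩
        intro k v hv
        rw [PySem.Dict.get?_insert]
        split
        · rename_i hk; subst hk
          rw [get?_none_of_not_contains hc'] at hv; cases hv
        · exact hv
  | succ d ih =>
      intro i j hij hjm memo hg
      by_cases hc : memo.contains (i * (lb.length + 1) + j) = true
      · exact ⟨1, memo, Nat.one_le_pow _ _ (by norm_num), hg,
          get?_some_of_contains la lb memo i j hjm hg hc,
          fun k v h => h,
          fun rest fuel => by
            rw [Nat.add_comm 1 fuel, step_hit la lb (lb.length + 1) _ i j rest fuel memo hc]⟩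
      have hc' : memo.contains (i * (lb.length + 1) + j) = false := by simpa using hc
      have hmono_ins : ∀ (v : Int),
          (∀ k w, memo.get? k = some w
            → (memo.insert (i * (lb.length + 1) + j) v).get? k = some w) := by
        intro v k w hw
        rw [PySem.Dict.get?_insert]
        split
        · rename_i hk; subst hk
          rw [get?_none_of_not_contains hc'] at hw; cases hw
        · exact hw
      by_cases hij0 : i = 0 ∨ j = 0
      · refine ⟨1, memo.insert (i * (lb.length + 1) + j) 0,
          Nat.one_le_pow _ _ (by norm_num),
          lcsGood_insert la lb memo i j 0 hjm hg (lcsL_zero la lb i j hij0).symm,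
          by rw [PySem.Dict.get?_insert]; simp [lcsL_zero la lb i j hij0],
          hmono_ins 0,
          fun rest fuel => by
            rw [Nat.add_comm 1 fuel, step_base la lb (lb.length + 1) _ i j rest fuel memo hc' hij0]⟩
      obtain ⟨i', rfl⟩ : ∃ i', i = i' + 1 := by
        cases i with
        | zero => exact absurd (Or.inl rfl) hij0
        | succ n => exact ⟨n, rfl⟩
      obtain ⟨j', rfl⟩ : ∃ j', j = j' + 1 := by
        cases j with
        | zero => exact absurd (Or.inr rfl) hij0
        | succ n => exact ⟨n, rfl⟩
      have h5 : 1 ≤ 5 ^ (d + 1) := Nat.one_le_pow _ _ (by norm_num)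
      by_cases ha : la.getD i' 0 = lb.getD j' 0
      · -- match branch
        cases hcd : memo.get? (i' * (lb.length + 1) + j') with
        | some v =>
            have hvd : v = lcsL la lb i' j' := hg i' j' v (by omega) hcd
            have hval : v + 1 = lcsL la lb (i' + 1) (j' + 1) := by
              rw [hvd, lcsL_succ, if_pos ha]
            refine ⟨1, memo.insert ((i' + 1) * (lb.length + 1) + (j' + 1)) (v + 1),
              by omega,
              lcsGood_insert la lb memo _ _ _ hjm hg hval.symm.symm,
              by rw [PySem.Dict.get?_insert]; simp [hval],
              ?_,
              fun rest fuel => by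
                rw [Nat.add_comm 1 fuel,
                  step_match_hit la lb (lb.length + 1) i' j' rest fuel memo v hc' ha hcd]⟩
            intro k w hw
            rw [PySem.Dict.get?_insert]
            split
            · rename_i hk; subst hk
              rw [get?_none_of_not_contains hc'] at hw; cases hw
            · exact hw
        | none =>
            obtain ⟨F₁, memo₁, hF₁, hg₁, hget₁, hmono₁, hrun₁⟩ :=
              ih i' j' (by omega) (by omega) memo hg
            by_cases hc₁ : memo₁.contains ((i' + 1) * (lb.length + 1) + (j' + 1)) = true
            · refine ⟨1 + F₁ + 1, memo₁, by omega, hg₁,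
                get?_some_of_contains la lb memo₁ _ _ hjm hg₁ hc₁, hmono₁,
                fun rest fuel => ?_⟩
              have e : 1 + F₁ + 1 + fuel = (F₁ + (fuel + 1)) + 1 := by omega
              rw [e, step_match_push la lb (lb.length + 1) i' j' rest _ memo hc' ha hcd,
                hrun₁ (((i' + 1) * (lb.length + 1) + (j' + 1), i' + 1, j' + 1) :: rest) (fuel + 1),
                step_hit la lb (lb.length + 1) _ (i' + 1) (j' + 1) rest fuel memo₁ hc₁]
            · have hc₁' : memo₁.contains ((i' + 1) * (lb.length + 1) + (j' + 1)) = false := by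
                simpa using hc₁
              have hval : lcsL la lb i' j' + 1 = lcsL la lb (i' + 1) (j' + 1) := by
                rw [lcsL_succ, if_pos ha]
              have hmono_ins₁ : ∀ (v : Int),
                  (∀ k w, memo₁.get? k = some w
                    → (memo₁.insert ((i' + 1) * (lb.length + 1) + (j' + 1)) v).get? k = some w) := by
                intro v k w hw
                rw [PySem.Dict.get?_insert]
                split
                · rename_i hk; subst hk
                  rw [get?_none_of_not_contains hc₁'] at hw; cases hw
                · exact hw
              refine ⟨1 + F₁ + 1,
                memo₁.insert ((i' + 1) * (lb.length + 1) + (j' + 1)) (lcsL la lb i' j' + 1),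
                by omega,
                lcsGood_insert la lb memo₁ _ _ _ hjm hg₁ hval,
                by rw [PySem.Dict.get?_insert]; simp [hval],
                fun k w hw => hmono_ins₁ _ k w (hmono₁ k w hw),
                fun rest fuel => ?_⟩
              have e : 1 + F₁ + 1 + fuel = (F₁ + (fuel + 1)) + 1 := by omega
              rw [e, step_match_push la lb (lb.length + 1) i' j' rest _ memo hc' ha hcd,
                hrun₁ (((i' + 1) * (lb.length + 1) + (j' + 1), i' + 1, j' + 1) :: rest) (fuel + 1),
                step_match_hit la lb (lb.length + 1) i' j' rest fuel memo₁
                  (lcsL la lb i' j') hc₁' ha hget₁]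
      · -- mismatch branch
        have phase1 : ∃ (F₁ : Nat) (memo₁ : PySem.Dict Nat Int),
            F₁ ≤ 1 + 5 ^ (d + 1) ∧ lcsGood la lb memo₁ ∧
            memo₁.get? (i' * (lb.length + 1) + (j' + 1)) = some (lcsL la lb i' (j' + 1)) ∧
            (∀ k v, memo.get? k = some v → memo₁.get? k = some v) ∧
            (∀ rest fuel,
              lcsRun la lb (lb.length + 1) (F₁ + fuel)
                  (((i' + 1) * (lb.length + 1) + (j' + 1), i' + 1, j' + 1) :: rest) memo
                = lcsRun la lb (lb.length + 1) fuel
                    (((i' + 1) * (lb.length + 1) + (j' + 1), i' + 1, j' + 1) :: rest) memo₁) := by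
          cases hl : memo.get? (i' * (lb.length + 1) + (j' + 1)) with
          | some vl =>
              exact ⟨0, memo, by omega, hg,
                by rw [hl, hg i' (j' + 1) vl hjm hl], fun k v h => h,
                fun rest fuel => by rw [Nat.zero_add]⟩
          | none =>
              obtain ⟨F₁, memo₁, hF₁, hg₁, hget₁, hmono₁, hrun₁⟩ :=
                ih i' (j' + 1) (by omega) hjm memo hg
              refine ⟨1 + F₁, memo₁, by omega, hg₁, hget₁, hmono₁, fun rest fuel => ?_⟩
              have e : 1 + F₁ + fuel = (F₁ + fuel) + 1 := by omega
              rw [e, step_left_push la lb (lb.length + 1) i' j' rest _ memo hc' ha hl,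
                hrun₁ (((i' + 1) * (lb.length + 1) + (j' + 1), i' + 1, j' + 1) :: rest) fuel]
        obtain ⟨F₁, memo₁, hF₁, hg₁, hgetl, hmono₁, hrunA⟩ := phase1
        by_cases hc₁ : memo₁.contains ((i' + 1) * (lb.length + 1) + (j' + 1)) = true
        · refine ⟨F₁ + 1, memo₁, by omega, hg₁,
            get?_some_of_contains la lb memo₁ _ _ hjm hg₁ hc₁, hmono₁,
            fun rest fuel => ?_⟩
          have e : F₁ + 1 + fuel = F₁ + (fuel + 1) := by omega
          rw [e, hrunA rest (fuel + 1),
            step_hit la lb (lb.length + 1) _ (i' + 1) (j' + 1) rest fuel memo₁ hc₁]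
        have hc₁' : memo₁.contains ((i' + 1) * (lb.length + 1) + (j' + 1)) = false := by
          simpa using hc₁
        have phase2 : ∃ (F₂ : Nat) (memo₂ : PySem.Dict Nat Int),
            F₂ ≤ 1 + 5 ^ (d + 1) ∧ lcsGood la lb memo₂ ∧
            memo₂.get? ((i' + 1) * (lb.length + 1) + j') = some (lcsL la lb (i' + 1) j') ∧
            (∀ k v, memo₁.get? k = some v → memo₂.get? k = some v) ∧
            (∀ rest fuel,
              lcsRun la lb (lb.length + 1) (F₂ + fuel)
                  (((i' + 1) * (lb.length + 1) + (j' + 1), i' + 1, j' + 1) :: rest) memo₁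
                = lcsRun la lb (lb.length + 1) fuel
                    (((i' + 1) * (lb.length + 1) + (j' + 1), i' + 1, j' + 1) :: rest) memo₂) := by
          cases hr : memo₁.get? ((i' + 1) * (lb.length + 1) + j') with
          | some vu =>
              exact ⟨0, memo₁, by omega, hg₁,
                by rw [hr, hg₁ (i' + 1) j' vu (by omega) hr], fun k v h => h,
                fun rest fuel => by rw [Nat.zero_add]⟩
          | none =>
              obtain ⟨F₂, memo₂, hF₂, hg₂, hget₂, hmono₂, hrun₂⟩ :=
                ih (i' + 1) j' (by omega) (by omega) memo₁ hg₁
              refine ⟨1 + F₂, memo₂, by omega, hg₂, hget₂, hmono₂, fun rest fuel => ?_⟩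
              have e : 1 + F₂ + fuel = (F₂ + fuel) + 1 := by omega
              rw [e, step_right_push la lb (lb.length + 1) i' j' rest _ memo₁
                  (lcsL la lb i' (j' + 1)) hc₁' ha hgetl hr,
                hrun₂ (((i' + 1) * (lb.length + 1) + (j' + 1), i' + 1, j' + 1) :: rest) fuel]
        obtain ⟨F₂, memo₂, hF₂, hg₂, hgetr, hmono₂, hrunB⟩ := phase2
        have hgetl₂ : memo₂.get? (i' * (lb.length + 1) + (j' + 1))
            = some (lcsL la lb i' (j' + 1)) := hmono₂ _ _ hgetl
        by_cases hc₂ : memo₂.contains ((i' + 1) * (lb.length + 1) + (j' + 1)) = true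
        · refine ⟨F₁ + F₂ + 1, memo₂, by omega,
            hg₂, get?_some_of_contains la lb memo₂ _ _ hjm hg₂ hc₂,
            fun k v h => hmono₂ k v (hmono₁ k v h),
            fun rest fuel => ?_⟩
          have e : F₁ + F₂ + 1 + fuel = F₁ + (F₂ + (fuel + 1)) := by omega
          rw [e, hrunA rest (F₂ + (fuel + 1)), hrunB rest (fuel + 1),
            step_hit la lb (lb.length + 1) _ (i' + 1) (j' + 1) rest fuel memo₂ hc₂]
        have hc₂' : memo₂.contains ((i' + 1) * (lb.length + 1) + (j' + 1)) = false := by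
          simpa using hc₂
        have hval : (if lcsL la lb i' (j' + 1) > lcsL la lb (i' + 1) j'
              then lcsL la lb i' (j' + 1) else lcsL la lb (i' + 1) j')
            = lcsL la lb (i' + 1) (j' + 1) := by
          rw [lcsL_succ, if_neg ha]
          split <;> omega
        have hmono_ins₂ : ∀ (v : Int),
            (∀ k w, memo₂.get? k = some w
              → (memo₂.insert ((i' + 1) * (lb.length + 1) + (j' + 1)) v).get? k = some w) := by
          intro v k w hw
          rw [PySem.Dict.get?_insert]
          split
          · rename_i hk; subst hk
            rw [get?_none_of_not_contains hc₂'] at hw; cases hw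
          · exact hw
        refine ⟨F₁ + F₂ + 1,
          memo₂.insert ((i' + 1) * (lb.length + 1) + (j' + 1))
            (if lcsL la lb i' (j' + 1) > lcsL la lb (i' + 1) j'
              then lcsL la lb i' (j' + 1) else lcsL la lb (i' + 1) j'),
          by omega,
          lcsGood_insert la lb memo₂ _ _ _ hjm hg₂ hval,
          by rw [PySem.Dict.get?_insert]; simp [hval],
          fun k w hw => hmono_ins₂ _ k w (hmono₂ k w (hmono₁ k w hw)),
          fun rest fuel => ?_⟩
        have e : F₁ + F₂ + 1 + fuel = F₁ + (F₂ + (fuel + 1)) := by omega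
        rw [e, hrunA rest (F₂ + (fuel + 1)), hrunB rest (fuel + 1),
          step_resolve la lb (lb.length + 1) i' j' rest fuel memo₂
            (lcsL la lb i' (j' + 1)) (lcsL la lb (i' + 1) j') hc₂' ha hgetl₂ hgetr]

-- ===== VERDICT helper chain for A (characterisation of the DP table) =====

-- canonical value of the new DP row at position j (prev = previous row, a = current element)
def vRow (a : Int) (prev list_b : List Int) : Nat → Int
  | 0 => 0
  | j + 1 => if a = list_b.getD j 0 then prev.getD j 0 + 1
             else max (prev.getD (j + 1) 0) (vRow a prev list_b j)

-- a foldl over a list is a foldl over its index range reading getD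
theorem foldl_eq_range_getD {α β : Type} (d : α) (F : β → α → β) (l : List α) (init : β) :
    l.foldl F init = (List.range l.length).foldl (fun s ii => F s (l.getD ii d)) init := by
  induction l using List.reverseRecOn generalizing init with
  | nil => simp
  | append_singleton l x ih =>
      rw [List.foldl_append, ih init, List.length_append, List.length_singleton,
        List.range_succ, List.foldl_append]
      have hcongr : List.foldl (fun s ii => F s ((l ++ [x]).getD ii d)) init (List.range l.length)
          = List.foldl (fun s ii => F s (l.getD ii d)) init (List.range l.length) := by
        apply PySem.List.foldl_congr_mem
        intro s ii hii
        have h : ii < l.length := List.mem_range.mp hii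
        simp [List.getD, List.getElem?_append_left h]
      rw [hcongr]
      simp [List.getD]

-- the row update A's inner loop performs, as a self-contained function
def nextRow (prev : List Int) (a : Int) (list_b : List Int) : List Int :=
  (((prev.drop 1).zip (prev.zip list_b)).foldl
      (fun (st : Int × List Int) t =>
        let last : Int := if a = t.2.2 then t.2.1 + 1 else max t.1 st.1
        (last, st.2 ++ [last]))
      (0, [0])).2

theorem nextRow_eq_map_vRow (a : Int) (prev list_b : List Int)
    (hlen : prev.length = list_b.length + 1) :
    nextRow prev a list_b = (List.range (list_b.length + 1)).map (vRow a prev list_b) := by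
  have hm : ((prev.drop 1).zip (prev.zip list_b)).length = list_b.length := by
    simp [hlen]
  have hget : ∀ n, n < list_b.length →
      ((prev.drop 1).zip (prev.zip list_b)).getD n ((0:Int),(0:Int),(0:Int)) =
        (prev.getD (n+1) 0, prev.getD n 0, list_b.getD n 0) := by
    intro n hn
    have hz : n < ((prev.drop 1).zip (prev.zip list_b)).length := by omega
    have h1 : n < (prev.drop 1).length := by simp [hlen]; omega
    have h2 : n < (prev.zip list_b).length := by simp [hlen]; omega
    have hp1 : n + 1 < prev.length := by omega
    have hp : n < prev.length := by omega
    rw [List.getD_eq_getElem _ _ hz, List.getElem_zip, List.getElem_zip,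
      List.getElem_drop, List.getD_eq_getElem _ _ hp1, List.getD_eq_getElem _ _ hp,
      List.getD_eq_getElem _ _ hn]
    simp [Nat.add_comm 1 n]
  have aux : ∀ n, n ≤ list_b.length →
      (List.range n).foldl (fun (st : Int × List Int) ii =>
          (fun (st : Int × List Int) (t : Int × Int × Int) =>
            let last : Int := if a = t.2.2 then t.2.1 + 1 else max t.1 st.1
            (last, st.2 ++ [last])) st
            (((prev.drop 1).zip (prev.zip list_b)).getD ii ((0:Int),(0:Int),(0:Int))))
          ((0:Int), [(0:Int)])
        = (vRow a prev list_b n, (List.range (n+1)).map (vRow a prev list_b)) := by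
    intro n
    induction n with
    | zero => intro _; simp [vRow]
    | succ k ih =>
        intro h
        rw [List.range_succ, List.foldl_append, ih (by omega)]
        simp only [List.foldl_cons, List.foldl_nil]
        rw [hget k (by omega)]
        show ((if a = list_b.getD k 0 then prev.getD k 0 + 1
                else max (prev.getD (k+1) 0) (vRow a prev list_b k)),
              (List.range (k+1)).map (vRow a prev list_b) ++
                [if a = list_b.getD k 0 then prev.getD k 0 + 1
                  else max (prev.getD (k+1) 0) (vRow a prev list_b k)]) = _
        have hv : vRow a prev list_b (k+1) =
            if a = list_b.getD k 0 then prev.getD k 0 + 1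
            else max (prev.getD (k+1) 0) (vRow a prev list_b k) := rfl
        rw [← hv, List.range_succ (n := k+1), List.map_append, List.map_singleton]
  unfold nextRow
  rw [foldl_eq_range_getD ((0:Int),(0:Int),(0:Int)), hm, aux list_b.length le_rfl]

theorem length_nextRow (a : Int) (prev list_b : List Int)
    (hlen : prev.length = list_b.length + 1) :
    (nextRow prev a list_b).length = list_b.length + 1 := by
  rw [nextRow_eq_map_vRow a prev list_b hlen]; simp

-- partial result of the row-by-row DP (first k elements of list_a)
def rowB (list_a list_b : List Int) (k : Nat) : List Int :=
  (List.range k).foldl (fun r ii => nextRow r (list_a.getD ii 0) list_b)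
    (List.replicate (list_b.length + 1) (0 : Int))

theorem length_rowB (list_a list_b : List Int) (k : Nat) :
    (rowB list_a list_b k).length = list_b.length + 1 := by
  induction k with
  | zero => simp [rowB]
  | succ n ih =>
      rw [rowB, List.range_succ, List.foldl_append]
      exact length_nextRow _ _ _ ih

-- A's inner loop, on a table whose row ii is prev and row ii+1 is zeros, writes row ii+1 = nextRow
theorem innerA (list_a list_b : List Int) (ii : Nat) (dp : List (List Int)) (prev : List Int)
    (hii : ii + 1 < dp.length) (hprev : dp.getD ii [] = prev)
    (hlen : prev.length = list_b.length + 1)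
    (hz : dp.getD (ii + 1) [] = List.replicate (list_b.length + 1) (0 : Int)) :
    (List.range list_b.length).foldl (fun dp jj =>
        let v : Int :=
          if list_a.getD ii 0 = list_b.getD jj 0 then
            (dp.getD ii []).getD jj 0 + 1
          else
            max ((dp.getD ii []).getD (jj + 1) 0) ((dp.getD (ii + 1) []).getD jj 0)
        dp.set (ii + 1) ((dp.getD (ii + 1) []).set (jj + 1) v)) dp
      = dp.set (ii + 1) (nextRow prev (list_a.getD ii 0) list_b) := by
  set a := list_a.getD ii 0 with ha
  set m := list_b.length with hmm
  have aux : ∀ n, n ≤ m →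
      (List.range n).foldl (fun dp jj =>
          let v : Int :=
            if a = list_b.getD jj 0 then
              (dp.getD ii []).getD jj 0 + 1
            else
              max ((dp.getD ii []).getD (jj + 1) 0) ((dp.getD (ii + 1) []).getD jj 0)
          dp.set (ii + 1) ((dp.getD (ii + 1) []).set (jj + 1) v)) dp
        = dp.set (ii + 1)
            ((List.range (n+1)).map (vRow a prev list_b) ++ List.replicate (m - n) (0:Int)) := by
    intro n
    induction n with
    | zero =>
        intro _
        have h0 : (List.range 1).map (vRow a prev list_b) ++ List.replicate (m - 0) (0:Int)
            = List.replicate (m + 1) (0:Int) := by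
          simp [List.range_succ, List.replicate_succ, vRow]
        rw [h0, ← hz]
        have hlt : ii + 1 < dp.length := hii
        rw [List.getD_eq_getElem _ _ hlt, List.set_getElem_self]
        rfl
    | succ k ih =>
        intro h
        rw [List.range_succ, List.foldl_append, ih (by omega)]
        simp only [List.foldl_cons, List.foldl_nil]
        set Rk := (List.range (k+1)).map (vRow a prev list_b) ++ List.replicate (m - k) (0:Int)
          with hRk
        set dpk := dp.set (ii + 1) Rk with hdpk
        have hprev' : dpk.getD ii [] = prev := by
          rw [hdpk, List.getD, List.getElem?_set_ne (by omega), ← List.getD]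
          exact hprev
        have hlt : ii + 1 < dpk.length := by simp [hdpk]; omega
        have hrow : dpk.getD (ii+1) [] = Rk := by
          rw [hdpk, List.getD, List.getElem?_set_self (by omega)]; rfl
        have hRkk : Rk.getD k 0 = vRow a prev list_b k := by
          rw [hRk, List.getD, List.getElem?_append_left (by simp)]
          simp
        show dpk.set (ii + 1) ((dpk.getD (ii + 1) []).set (k + 1)
            (if a = list_b.getD k 0 then (dpk.getD ii []).getD k 0 + 1
             else max ((dpk.getD ii []).getD (k + 1) 0) ((dpk.getD (ii + 1) []).getD k 0))) = _
        rw [hprev', hrow, hRkk, hRk]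
        have hset : ((List.range (k+1)).map (vRow a prev list_b)
              ++ List.replicate (m - k) (0:Int)).set (k + 1)
              (if a = list_b.getD k 0 then prev.getD k 0 + 1
               else max (prev.getD (k + 1) 0) (vRow a prev list_b k))
            = (List.range (k+2)).map (vRow a prev list_b) ++ List.replicate (m - (k+1)) (0:Int) := by
          rw [List.set_append]
          have hl : ¬ (k + 1 < ((List.range (k+1)).map (vRow a prev list_b)).length) := by
            simp
          rw [if_neg hl]
          have hrep : (List.replicate (m - k) (0:Int)).set
                (k + 1 - ((List.range (k+1)).map (vRow a prev list_b)).length)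
                (if a = list_b.getD k 0 then prev.getD k 0 + 1
                 else max (prev.getD (k + 1) 0) (vRow a prev list_b k))
              = vRow a prev list_b (k+1) :: List.replicate (m - (k+1)) (0:Int) := by
            have : m - k = (m - (k+1)) + 1 := by omega
            rw [this, List.replicate_succ]
            simp [vRow]
          rw [hrep, List.range_succ (n := k+1), List.map_append]
          simp
        rw [hdpk, List.set_set, hset]
  rw [aux m le_rfl, nextRow_eq_map_vRow a prev list_b hlen]
  simp only [Nat.sub_self, List.replicate_zero, List.append_nil]
  rfl

-- A's outer loop maintains: rows 0..n are the DP rows, the rest are zeros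
theorem outerA (list_a list_b : List Int) (n : Nat) (hn : n ≤ list_a.length) :
    (List.range n).foldl (fun dp ii =>
        (List.range list_b.length).foldl (fun dp jj =>
            let v : Int :=
              if list_a.getD ii 0 = list_b.getD jj 0 then
                (dp.getD ii []).getD jj 0 + 1
              else
                max ((dp.getD ii []).getD (jj + 1) 0) ((dp.getD (ii + 1) []).getD jj 0)
            dp.set (ii + 1) ((dp.getD (ii + 1) []).set (jj + 1) v)) dp)
      (List.replicate (list_a.length + 1) (List.replicate (list_b.length + 1) (0 : Int)))
      = (List.range (n + 1)).map (rowB list_a list_b)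
        ++ List.replicate (list_a.length - n) (List.replicate (list_b.length + 1) (0 : Int)) := by
  induction n with
  | zero =>
      simp [rowB, List.replicate_succ]
  | succ k ih =>
      rw [List.range_succ, List.foldl_append, ih (by omega)]
      simp only [List.foldl_cons, List.foldl_nil]
      set W := (List.range (k+1)).map (rowB list_a list_b) with hW
      set rep := List.replicate (list_a.length - k) (List.replicate (list_b.length + 1) (0:Int))
        with hrep
      have hWlen : W.length = k + 1 := by simp [hW]
      have hreplen : rep.length = list_a.length - k := by simp [hrep]
      have hii : k + 1 < (W ++ rep).length := by
        rw [List.length_append, hWlen, hreplen]; omega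
      have hprev : (W ++ rep).getD k [] = rowB list_a list_b k := by
        rw [List.getD, List.getElem?_append_left (by omega)]
        simp [hW]
      have hzz : (W ++ rep).getD (k+1) [] = List.replicate (list_b.length + 1) (0:Int) := by
        rw [List.getD, List.getElem?_append_right (by omega), hWlen]
        have : list_a.length - k = (list_a.length - (k+1)) + 1 := by omega
        rw [hrep, this, List.replicate_succ]
        simp
      rw [innerA list_a list_b k (W ++ rep) (rowB list_a list_b k) hii hprev
        (length_rowB list_a list_b k) hzz]
      have hnext : nextRow (rowB list_a list_b k) (list_a.getD k 0) list_b
          = rowB list_a list_b (k+1) := by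
        simp only [rowB]
        rw [List.range_succ, List.foldl_append]
        simp only [List.foldl_cons, List.foldl_nil]
      rw [hnext, List.set_append]
      have hno : ¬ (k + 1 < W.length) := by omega
      rw [if_neg hno, hWlen, Nat.sub_self]
      have hsetrep : rep.set 0 (rowB list_a list_b (k+1))
          = rowB list_a list_b (k+1) :: List.replicate (list_a.length - (k+1))
              (List.replicate (list_b.length + 1) (0:Int)) := by
        have : list_a.length - k = (list_a.length - (k+1)) + 1 := by omega
        rw [hrep, this, List.replicate_succ, List.set_cons_zero]
      rw [hsetrep, hW, List.range_succ (n := k+1), List.map_append]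
      simp

-- the DP rows compute lcsL
theorem rowB_getD (la lb : List Int) :
    ∀ i, i ≤ la.length → ∀ j, j ≤ lb.length →
      (rowB la lb i).getD j 0 = lcsL la lb i j := by
  intro i
  induction i with
  | zero =>
      intro _ j hj
      have h0 : rowB la lb 0 = List.replicate (lb.length + 1) (0 : Int) := by simp [rowB]
      rw [h0, lcsL_zero la lb 0 j (Or.inl rfl), List.getD, List.getElem?_replicate]
      simp [Nat.lt_succ_of_le hj]
  | succ k ih =>
      intro hk j hj
      have hrow : rowB la lb (k + 1) = nextRow (rowB la lb k) (la.getD k 0) lb := by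
        simp only [rowB]
        rw [List.range_succ, List.foldl_append]
        simp only [List.foldl_cons, List.foldl_nil]
      have ihk := ih (by omega)
      have hv : ∀ t, t ≤ lb.length →
          vRow (la.getD k 0) (rowB la lb k) lb t = lcsL la lb (k + 1) t := by
        intro t
        induction t with
        | zero => intro _; simp [vRow, lcsL]
        | succ t iht =>
            intro ht
            have e1 := ihk t (by omega)
            have e2 := ihk (t + 1) (by omega)
            have e3 := iht (by omega)
            simp only [vRow, lcsL_succ, e1, e2, e3]
      rw [hrow, nextRow_eq_map_vRow _ _ _ (length_rowB la lb k)]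
      have hjlt : j < lb.length + 1 := by omega
      rw [List.getD, List.getElem?_map, List.getElem?_range hjlt]
      simpa [List.getD] using hv j hj

-- ===== VERDICT (by name: the statement is the Claim_ definition above) =====
theorem find_min_diff_lengths_spec : Claim_equal_find_min_diff_lengths := by
  intro la lb _
  unfold Spec_find_min_diff_lengths
  simp only [find_min_diff_lengths, find_min_diff_lengths_alt]
  rw [outerA la lb la.length le_rfl]
  have hgetA : ((List.range (la.length + 1)).map (rowB la lb)
        ++ List.replicate (la.length - la.length)
            (List.replicate (lb.length + 1) (0 : Int))).getD la.length []
      = rowB la lb la.length := by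
    rw [Nat.sub_self, List.replicate_zero, List.append_nil, List.getD]
    simp
  rw [hgetA, rowB_getD la lb la.length le_rfl lb.length le_rfl]
  have hempty : lcsGood la lb PySem.Dict.empty := by
    intro i j v _ h
    rw [PySem.Dict.get?_empty] at h
    cases h
  obtain ⟨F, memo', hF, hg', hget', _, hrun⟩ :=
    lcsRun_resolves la lb (la.length + lb.length) la.length lb.length le_rfl le_rfl
      PySem.Dict.empty hempty
  have hsplit : 5 ^ (la.length + lb.length + 1) + 1
      = F + (5 ^ (la.length + lb.length + 1) + 1 - F) := by omega
  rw [hsplit, hrun [] _, run_nil, PySem.Dict.getD_of_get?_eq_some _ _ hget']
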